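-- pv_equiv track=rewrite | github.com/Egraf99/Running_line | symbols.py | up_center_bottom
-- ===== SOURCE A (Python) =====
-- def up_center_bottom(pix_column: list, height: int, symbol_id, order_col) -> list:
--     for h in range(height):
--         if h == 0:
--             pix_column.append(symbol_id[0])
--         elif h == height // 2:
--             pix_column.append(symbol_id[1])
--         elif h == height - 1:
--             pix_column.append(symbol_id[2])
--         else:
--             pix_column.append(0)
--     return pix_column
-- ===== SOURCE B (Python) =====
-- def up_center_bottom(pix_column: list, height: int, symbol_id, order_col) -> list:
--     # Fill the new region with zeros in one shot, then place the three markers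
--     # by index in reverse priority (top marker wins collisions at small heights).
--     if height <= 0:
--         return pix_column
--     tail = [0] * height
--     if height >= 3:
--         tail[height - 1] = symbol_id[2]
--     if height >= 2:
--         tail[height // 2] = symbol_id[1]
--     tail[0] = symbol_id[0]
--     pix_column.extend(tail)
--     return pix_column
-- ===== Notes on version B (the rewrite author's own statement) =====
-- stated objective: alternative
-- what changed: A appends cell by cell with a four-way branch per loop iteration; B builds the new region as a zero-filled block in one shot ([0]*height + extend) and then writes the three markers by direct index assignment in reverse priority, with no per-cell loop.
import Mathlib
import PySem

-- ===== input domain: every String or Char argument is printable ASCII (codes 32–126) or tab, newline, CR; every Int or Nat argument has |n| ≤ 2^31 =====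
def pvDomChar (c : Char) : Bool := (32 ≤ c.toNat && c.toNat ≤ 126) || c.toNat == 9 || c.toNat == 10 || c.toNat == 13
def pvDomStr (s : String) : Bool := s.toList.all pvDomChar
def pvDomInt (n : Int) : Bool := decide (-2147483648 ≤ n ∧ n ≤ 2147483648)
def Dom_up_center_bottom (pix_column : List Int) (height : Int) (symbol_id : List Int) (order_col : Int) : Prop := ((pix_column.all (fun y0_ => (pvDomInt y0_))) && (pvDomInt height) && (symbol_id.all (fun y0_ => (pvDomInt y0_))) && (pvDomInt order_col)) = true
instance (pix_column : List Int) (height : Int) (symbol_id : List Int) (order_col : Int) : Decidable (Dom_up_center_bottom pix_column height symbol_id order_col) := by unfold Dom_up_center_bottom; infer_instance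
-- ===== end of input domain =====

-- B fills the new region with zeros in one shot and writes the three markers by index
-- (objective: alternative decomposition, same O(height) cost). Both A and B mutate
-- pix_column in place in Python (append/extend); the final list state equals the return
-- value proved about here.


-- ===== PORT A =====
-- symbol_id[i] is in range on every input admitted by Pre_, so pyGetD is exact there.
def up_center_bottom (pix_column : List Int) (height : Int) (symbol_id : List Int) (order_col : Int) : List Int :=
  (PySem.List.pyRange 0 height 1).foldl (fun acc h =>
    if h = 0 then acc ++ [PySem.List.pyGetD symbol_id 0 0]
    else if h = PySem.Int.floordiv height 2 then acc ++ [PySem.List.pyGetD symbol_id 1 0]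
    else if h = height - 1 then acc ++ [PySem.List.pyGetD symbol_id 2 0]
    else acc ++ [0]) pix_column

-- ===== PORT B =====
-- All assigned indices are nonnegative and < height, so List.set with .toNat is exact.
def up_center_bottom_alt (pix_column : List Int) (height : Int) (symbol_id : List Int) (order_col : Int) : List Int :=
  if height ≤ 0 then pix_column
  else
    let t0 := List.replicate height.toNat (0 : Int)
    let t1 := if 3 ≤ height then t0.set (height - 1).toNat (PySem.List.pyGetD symbol_id 2 0) else t0
    let t2 := if 2 ≤ height then t1.set (PySem.Int.floordiv height 2).toNat (PySem.List.pyGetD symbol_id 1 0) else t1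
    let t3 := t2.set 0 (PySem.List.pyGetD symbol_id 0 0)
    pix_column ++ t3

-- ===== PRECONDITION & SPEC =====
-- Pre_ excludes exactly the inputs where Python A raises IndexError on symbol_id
-- (it reads symbol_id[0]/[1]/[2] iff height ≥ 1/2/3); B raises there too.
def Pre_up_center_bottom (pix_column : List Int) (height : Int) (symbol_id : List Int) (order_col : Int) : Prop :=
  (1 ≤ height → 1 ≤ symbol_id.length) ∧ (2 ≤ height → 2 ≤ symbol_id.length) ∧ (3 ≤ height → 3 ≤ symbol_id.length)
instance (pix_column : List Int) (height : Int) (symbol_id : List Int) (order_col : Int) : Decidable (Pre_up_center_bottom pix_column height symbol_id order_col) := by unfold Pre_up_center_bottom; infer_instance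
def pvWitness_up_center_bottom : List Int × Int × List Int × Int := ([5, 6], 5, [7, 8, 9], 0)

def Spec_up_center_bottom (pix_column : List Int) (height : Int) (symbol_id : List Int) (order_col : Int) (out : List Int) : Prop := out = up_center_bottom_alt pix_column height symbol_id order_col
instance (pix_column : List Int) (height : Int) (symbol_id : List Int) (order_col : Int) (out : List Int) : Decidable (Spec_up_center_bottom pix_column height symbol_id order_col out) := by unfold Spec_up_center_bottom; infer_instance

-- ===== CLAIM (what is proved, stated in full; the proofs are below) =====
def Claim_equal_up_center_bottom : Prop := ∀ (pix_column : List Int) (height : Int) (symbol_id : List Int) (order_col : Int), Dom_up_center_bottom pix_column height symbol_id order_col → Pre_up_center_bottom pix_column height symbol_id order_col → Spec_up_center_bottom pix_column height symbol_id order_col (up_center_bottom pix_column height symbol_id order_col)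

-- ===== LEMMAS AND PROOFS =====

theorem up_center_bottom_eq (pix_column : List Int) (height : Int) (symbol_id : List Int) (order_col : Int) :
    up_center_bottom pix_column height symbol_id order_col = up_center_bottom_alt pix_column height symbol_id order_col := by
  unfold up_center_bottom up_center_bottom_alt
  by_cases h0 : height ≤ 0
  · rw [PySem.List.pyRange_one_eq_nil h0]
    simp [h0]
  · obtain ⟨n, rfl⟩ : ∃ n : Nat, height = (n : Int) := ⟨height.toNat, by omega⟩
    have hn : 1 ≤ n := by omega
    set s0 := PySem.List.pyGetD symbol_id 0 0
    set s1 := PySem.List.pyGetD symbol_id 1 0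
    set s2 := PySem.List.pyGetD symbol_id 2 0
    have hfd : PySem.Int.floordiv (n : Int) 2 = ((n / 2 : Nat) : Int) := by
      exact_mod_cast PySem.Int.floordiv_natCast n 2
    have hfun : (fun (acc : List Int) (h : Int) =>
        if h = 0 then acc ++ [s0]
        else if h = PySem.Int.floordiv (n : Int) 2 then acc ++ [s1]
        else if h = (n : Int) - 1 then acc ++ [s2]
        else acc ++ [0]) =
        (fun acc h => acc ++ [if h = 0 then s0
          else if h = PySem.Int.floordiv (n : Int) 2 then s1
          else if h = (n : Int) - 1 then s2 else 0]) := by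
      funext acc h; split_ifs <;> rfl
    rw [hfun, PySem.List.foldl_append_singleton_eq_map, PySem.List.pyRange_one]
    rw [if_neg (by omega)]
    congr 1
    have hlen : ((n : Int) - 0).toNat = n := by omega
    rw [hlen]
    apply List.ext_getElem
    · simp only [List.length_map, List.length_range]
      split_ifs <;> simp
    · intro i hi1 hi2
      simp only [List.length_map, List.length_range] at hi1
      simp only [List.getElem_map, List.getElem_range]
      split_ifs <;>
        simp_all [List.getElem_set, List.getElem_replicate] <;> omega

-- ===== VERDICT (by name: the statement is the Claim_ definition above) =====
theorem up_center_bottom_spec : Claim_equal_up_center_bottom := by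
  intro pix_column height symbol_id order_col _ _
  unfold Spec_up_center_bottom
  exact up_center_bottom_eq pix_column height symbol_id order_col
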